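-- pv_equiv track=rewrite | github.com/daniel-reich/ubiquitous-fiesta | hQRuQguN4bKyM2gik_1.py | simple_check
-- ===== SOURCE A (Python) =====
-- def simple_check(a, b):
--   a, b = max(a,b), min(a,b)
--   ans = 0
--
--   while b>0:
--     if a%b == 0: ans += 1
--     a -= 1
--     b -= 1
--
--   return ans
-- ===== SOURCE B (Python) =====
-- def simple_check(a, b):
--     # The loop in A tests, for i = 0..min-1, whether (min-i) divides (max-i);
--     # since (max-i) - (min-i) = max - min is constant, this counts the divisors
--     # of d = max - min that are <= min.  Count them by trial division up to sqrt(d).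
--     hi, lo = (a, b) if a >= b else (b, a)
--     if lo <= 0:
--         return 0
--     d = hi - lo
--     if d == 0:
--         return lo
--     count = 0
--     i = 1
--     while i * i <= d:
--         if d % i == 0:
--             if i <= lo:
--                 count += 1
--             j = d // i
--             if j != i and j <= lo:
--                 count += 1
--         i += 1
--     return count
-- ===== Notes on version B (the rewrite author's own statement) =====
-- stated objective: faster
-- what changed: A scans all of min(a,b) pairs (max-i, min-i); B observes the difference d = max-min is invariant, so the answer is the number of divisors of d that are <= min (or min itself when a==b), counted by trial division up to sqrt(d).
import Mathlib
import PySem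

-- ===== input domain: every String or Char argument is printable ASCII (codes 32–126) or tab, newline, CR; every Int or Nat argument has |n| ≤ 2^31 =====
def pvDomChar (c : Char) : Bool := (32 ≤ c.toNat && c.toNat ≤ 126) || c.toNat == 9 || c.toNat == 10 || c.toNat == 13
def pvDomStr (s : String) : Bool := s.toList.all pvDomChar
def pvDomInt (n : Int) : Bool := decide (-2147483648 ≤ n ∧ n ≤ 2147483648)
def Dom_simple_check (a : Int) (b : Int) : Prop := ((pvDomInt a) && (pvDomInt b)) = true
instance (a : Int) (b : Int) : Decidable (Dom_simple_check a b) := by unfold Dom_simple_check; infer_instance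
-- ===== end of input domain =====

-- B replaces A's scan of all min(a,b) pairs by counting the divisors of d = max-min that are
-- ≤ min, by trial division up to sqrt(d) (objective: faster).

-- ===== PORT A =====
-- while b>0: if a%b == 0: ans += 1; a -= 1; b -= 1
def simpleLoopA (a : Int) (b : Int) (ans : Int) : Int :=
  if h : b > 0 then
    simpleLoopA (a - 1) (b - 1) (if PySem.Int.mod a b = 0 then ans + 1 else ans)
  else ans
termination_by b.toNat
decreasing_by omega

def simple_check (a : Int) (b : Int) : Int :=
  simpleLoopA (max a b) (min a b) 0

-- ===== PORT B =====
-- while i*i <= d: if d % i == 0: (i <= lo?), j = d//i, (j != i and j <= lo?); i += 1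
def simpleLoopB (d : Int) (lo : Int) (i : Int) (count : Int) : Int :=
  if h : i * i ≤ d then
    simpleLoopB d lo (i + 1)
      (if PySem.Int.mod d i = 0 then
        (count + (if i ≤ lo then 1 else 0)) +
          (if PySem.Int.floordiv d i ≠ i ∧ PySem.Int.floordiv d i ≤ lo then 1 else 0)
      else count)
  else count
termination_by (d + 1 - i).toNat
decreasing_by
  have hd0 : 0 ≤ d := le_trans (mul_self_nonneg i) h
  have hid : i ≤ d := by
    by_cases h0 : i ≤ 0
    · omega
    · have h1 : (0:Int) < i := by omega
      calc i = i * 1 := (mul_one i).symm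
        _ ≤ i * i := by exact mul_le_mul_of_nonneg_left h1 (le_of_lt h1)
        _ ≤ d := h
  omega

def simple_check_alt (a : Int) (b : Int) : Int :=
  let hi := if a ≥ b then a else b
  let lo := if a ≥ b then b else a
  if lo ≤ 0 then 0
  else if hi - lo = 0 then lo
  else simpleLoopB (hi - lo) lo 1 0

-- ===== PRECONDITION & SPEC =====
def Spec_simple_check (a : Int) (b : Int) (out : Int) : Prop := out = simple_check_alt a b
instance (a : Int) (b : Int) (out : Int) : Decidable (Spec_simple_check a b out) := by unfold Spec_simple_check; infer_instance

-- ===== CLAIM (what is proved, stated in full; the proofs are below) =====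
def Claim_equal_simple_check : Prop := ∀ (a : Int) (b : Int), Dom_simple_check a b → Spec_simple_check a b (simple_check a b)

-- ===== LEMMAS AND PROOFS =====

-- number of k ∈ {1,…,n} with (k:Int) ∣ d, accumulated top-down as A's loop does
def cntDvd (d : Int) : Nat → Int
  | 0 => 0
  | n + 1 => (if ((n : Int) + 1) ∣ d then 1 else 0) + cntDvd d n

-- the contribution of trial divisor j in B's loop, in Nat form
def gNB (D : Nat) (L : Nat) (j : Nat) : Nat :=
  if D % j = 0 then
    (if j ≤ L then 1 else 0) + (if D / j ≠ j ∧ D / j ≤ L then 1 else 0)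
  else 0

lemma loopA_eq_cntDvd : ∀ (n : Nat) (d ans : Int),
    simpleLoopA (d + n) n ans = ans + cntDvd d n := by
  intro n
  induction n with
  | zero => intro d ans; rw [simpleLoopA]; simp [cntDvd]
  | succ n ih =>
    intro d ans
    rw [simpleLoopA]
    have hpos : ((n : Int) + 1) > 0 := by positivity
    rw [dif_pos (by push_cast; omega)]
    have e1 : d + ((n : Nat) + 1 : Nat) - 1 = d + n := by push_cast; ring
    have e2 : ((n : Nat) + 1 : Nat) - (1:Int) = (n : Nat) := by push_cast; ring
    rw [e1, e2, ih]
    have hmod : PySem.Int.mod (d + ((n : Nat) + 1 : Nat)) ((n : Nat) + 1 : Nat) = 0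
        ↔ ((n : Int) + 1) ∣ d := by
      rw [PySem.Int.mod_eq_zero_iff_dvd]; push_cast
      exact dvd_add_left (dvd_refl _)
    rw [cntDvd]
    split_ifs with h1 h2 h3 <;> simp_all <;> ring

lemma cntDvd_card (d : Int) (n : Nat) :
    cntDvd d n = (((Finset.Icc 1 n).filter (fun k : Nat => (k : Int) ∣ d)).card : Int) := by
  induction n with
  | zero => simp [cntDvd]
  | succ n ih =>
    rw [cntDvd, ih]
    have hins : Finset.Icc 1 (n+1) = insert (n+1) (Finset.Icc 1 n) := by
      ext x; simp [Finset.mem_Icc]; omega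
    rw [hins, Finset.filter_insert]
    by_cases hd : ((n : Int) + 1) ∣ d
    · rw [if_pos hd, if_pos (by push_cast; exact hd)]
      rw [Finset.card_insert_of_notMem (by simp [Finset.mem_filter, Finset.mem_Icc])]
      push_cast; ring
    · rw [if_neg hd, if_neg (by push_cast; exact hd)]
      ring

lemma loopB_eq_sum (d lo : Int) (hd : 0 < d) (hlo : 0 < lo) :
    ∀ (n : Nat) (i c : Int), 1 ≤ i → (d + 1 - i).toNat = n →
      simpleLoopB d lo i c =
        c + ((∑ j ∈ Finset.Icc i.toNat (Nat.sqrt d.toNat), gNB d.toNat lo.toNat j : Nat) : Int) := by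
  intro n
  induction n using Nat.strong_induction_on with
  | _ n ih =>
    intro i c hi hn
    have hdD : d = ((d.toNat : Nat) : Int) := (Int.toNat_of_nonneg hd.le).symm
    have hloL : lo = ((lo.toNat : Nat) : Int) := (Int.toNat_of_nonneg hlo.le).symm
    have hiN : i = ((i.toNat : Nat) : Int) := (Int.toNat_of_nonneg (by omega)).symm
    rw [simpleLoopB]
    by_cases h : i * i ≤ d
    · rw [dif_pos h]
      have hid : i ≤ d := by
        calc i = 1 * i := (one_mul i).symm
          _ ≤ i * i := by exact mul_le_mul_of_nonneg_right hi (by omega)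
          _ ≤ d := h
      have hrec : ∀ c' : Int, simpleLoopB d lo (i + 1) c'
          = c' + ((∑ j ∈ Finset.Icc (i+1).toNat (Nat.sqrt d.toNat), gNB d.toNat lo.toNat j : Nat) : Int) :=
        fun c' => ih (d + 1 - (i + 1)).toNat (by omega) (i + 1) c' (by omega) rfl
      rw [hrec]
      have hi1 : (i + 1).toNat = i.toNat + 1 := by omega
      have hir : i.toNat ≤ Nat.sqrt d.toNat := by
        rw [Nat.le_sqrt]
        have : ((i.toNat * i.toNat : Nat) : Int) ≤ ((d.toNat : Nat) : Int) := by
          push_cast; rw [← hiN, ← hdD]; exact h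
        exact_mod_cast this
      have hsplit : Finset.Icc i.toNat (Nat.sqrt d.toNat)
          = insert i.toNat (Finset.Icc (i.toNat + 1) (Nat.sqrt d.toNat)) := by
        ext x; simp [Finset.mem_Icc]; omega
      rw [hsplit, Finset.sum_insert (by simp [Finset.mem_Icc])]
      have hmod : PySem.Int.mod d i = ((d.toNat % i.toNat : Nat) : Int) := by
        rw [hdD, hiN, PySem.Int.mod_natCast]; simp
      have hdiv : PySem.Int.floordiv d i = ((d.toNat / i.toNat : Nat) : Int) := by
        rw [hdD, hiN, PySem.Int.floordiv_natCast]; simp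
      rw [hi1, hmod, hdiv, gNB]
      have c1 : (((d.toNat % i.toNat : Nat) : Int) = 0) ↔ (d.toNat % i.toNat = 0) := by
        exact_mod_cast Int.natCast_eq_zero
      have c2 : (i ≤ lo) ↔ (i.toNat ≤ lo.toNat) := by rw [hiN, hloL]; exact_mod_cast Iff.rfl
      have c3 : (((d.toNat / i.toNat : Nat) : Int) ≠ i) ↔ (d.toNat / i.toNat ≠ i.toNat) := by
        rw [hiN]; exact_mod_cast Iff.rfl
      have c4 : (((d.toNat / i.toNat : Nat) : Int) ≤ lo) ↔ (d.toNat / i.toNat ≤ lo.toNat) := by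
        rw [hloL]; exact_mod_cast Iff.rfl
      simp only [c1, c2, c3, c4]
      split_ifs <;> push_cast <;> ring
    · rw [dif_neg h]
      have hempty : Finset.Icc i.toNat (Nat.sqrt d.toNat) = ∅ := by
        rw [Finset.Icc_eq_empty_iff]
        intro hc
        have : i.toNat * i.toNat ≤ d.toNat := Nat.le_sqrt.mp hc
        have : ((i.toNat * i.toNat : Nat) : Int) ≤ ((d.toNat : Nat) : Int) := by exact_mod_cast this
        push_cast at this
        rw [← hiN, ← hdD] at this
        exact h this
      rw [hempty]; simp

lemma gNB_split (D L j : Nat) :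
    gNB D L j = (if D % j = 0 ∧ j ≤ L then 1 else 0)
              + (if D % j = 0 ∧ (D / j ≠ j ∧ D / j ≤ L) then 1 else 0) := by
  unfold gNB; split_ifs <;> simp_all

lemma div_facts (D a : Nat) (hD : 0 < D) (ha : 0 < a) (hmod : D % a = 0) :
    D % (D / a) = 0 ∧ D / (D / a) = a ∧ a * (D / a) = D ∧ 0 < D / a := by
  have hdvd : a ∣ D := Nat.dvd_of_mod_eq_zero hmod
  obtain ⟨c, hc⟩ := hdvd
  have hc0 : 0 < c := by
    rcases Nat.eq_zero_or_pos c with h | h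
    · subst h; omega
    · exact h
  have hda : D / a = c := by rw [hc, Nat.mul_div_cancel_left c ha]
  refine ⟨?_, ?_, by rw [hda, hc], by omega⟩
  · rw [hda]; exact Nat.dvd_iff_mod_eq_zero.mp ⟨a, by rw [hc, mul_comm]⟩
  · rw [hda, hc, Nat.mul_div_left a hc0]

lemma core_count (D L : Nat) (hD : 0 < D) :
    ∑ j ∈ Finset.Icc 1 (Nat.sqrt D), gNB D L j
      = ((Finset.Icc 1 L).filter (fun k => D % k = 0)).card := by
  have hsum : ∑ j ∈ Finset.Icc 1 (Nat.sqrt D), gNB D L j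
      = ((Finset.Icc 1 (Nat.sqrt D)).filter (fun j => D % j = 0 ∧ j ≤ L)).card
      + ((Finset.Icc 1 (Nat.sqrt D)).filter (fun j => D % j = 0 ∧ (D / j ≠ j ∧ D / j ≤ L))).card := by
    rw [Finset.card_filter, Finset.card_filter, ← Finset.sum_add_distrib]
    exact Finset.sum_congr rfl (fun j _ => gNB_split D L j)
  rw [hsum]
  have hTsplit : ((Finset.Icc 1 L).filter (fun k => D % k = 0)).card
      = (((Finset.Icc 1 L).filter (fun k => D % k = 0)).filter (fun k => k * k ≤ D)).card
      + (((Finset.Icc 1 L).filter (fun k => D % k = 0)).filter (fun k => ¬ k * k ≤ D)).card :=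
    (Finset.card_filter_add_card_filter_not (fun k => k * k ≤ D)).symm
  rw [hTsplit]
  have hsmall : ((Finset.Icc 1 (Nat.sqrt D)).filter (fun j => D % j = 0 ∧ j ≤ L))
      = (((Finset.Icc 1 L).filter (fun k => D % k = 0)).filter (fun k => k * k ≤ D)) := by
    ext x
    simp only [Finset.mem_filter, Finset.mem_Icc, ← Nat.le_sqrt]
    tauto
  rw [hsmall]
  congr 1
  -- large divisors ↔ small strict cofactors, via j ↦ D / j
  apply Finset.card_bij' (fun j _ => D / j) (fun k _ => D / k)
  · intro a ha
    simp only [Finset.mem_filter, Finset.mem_Icc] at ha ⊢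
    obtain ⟨⟨h1, h2⟩, hmod, hne, hle⟩ := ha
    have hsq : a * a ≤ D := Nat.le_sqrt.mp h2
    obtain ⟨hm2, hinv, hprod, hpos⟩ := div_facts D a hD (by omega) hmod
    refine ⟨⟨⟨hpos, hle⟩, hm2⟩, ?_⟩
    -- ¬ (D/a) * (D/a) ≤ D
    have hac : a < D / a := by
      rcases Nat.lt_or_ge a (D / a) with h | h
      · exact h
      · exfalso
        have : D / a * (D / a) ≤ a * (D / a) := Nat.mul_le_mul_right _ h
        have hD' : D ≤ a * (D / a) := by omega
        rw [hprod] at this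
        -- a*a ≤ D and D ≤ D/a * a... derive D/a = a
        have : D / a = a := by nlinarith
        exact hne this
    intro hc
    nlinarith
  · intro k hk
    simp only [Finset.mem_filter, Finset.mem_Icc] at hk ⊢
    obtain ⟨⟨⟨h1, h2⟩, hmod⟩, hbig⟩ := hk
    obtain ⟨hm2, hinv, hprod, hpos⟩ := div_facts D k hD (by omega) hmod
    have hck : D / k < k := by
      rcases Nat.lt_or_ge (D / k) k with h | h
      · exact h
      · exfalso; nlinarith
    refine ⟨⟨hpos, Nat.le_sqrt.mpr (by nlinarith)⟩, hm2, ?_, ?_⟩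
    · rw [hinv]; omega
    · rw [hinv]; exact h2
  · intro a ha
    simp only [Finset.mem_filter, Finset.mem_Icc] at ha
    obtain ⟨⟨h1, h2⟩, hmod, hne, hle⟩ := ha
    exact (div_facts D a hD (by omega) hmod).2.1
  · intro k hk
    simp only [Finset.mem_filter, Finset.mem_Icc] at hk
    obtain ⟨⟨⟨h1, h2⟩, hmod⟩, hbig⟩ := hk
    exact (div_facts D k hD (by omega) hmod).2.1

lemma AeqB (M m : Int) (h0 : 0 < m) (hle : m ≤ M) :
    simpleLoopA M m 0 = if M - m = 0 then m else simpleLoopB (M - m) m 1 0 := by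
  obtain ⟨n, rfl⟩ : ∃ n : Nat, m = (n : Int) := ⟨m.toNat, by omega⟩
  have hA : simpleLoopA M (n : Int) 0 = cntDvd (M - (n : Int)) n := by
    conv_lhs => rw [show M = (M - (n : Int)) + (n : Int) by ring]
    rw [loopA_eq_cntDvd]; ring
  rw [hA, cntDvd_card]
  by_cases hd : M - (n : Int) = 0
  · rw [if_pos hd, hd]
    rw [Finset.filter_true_of_mem (fun x _ => dvd_zero _), Nat.card_Icc]
    push_cast; omega
  · rw [if_neg hd]
    obtain ⟨Dn, hD⟩ : ∃ Dn : Nat, M - (n : Int) = (Dn : Int) := ⟨(M - (n:Int)).toNat, by omega⟩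
    rw [hD]
    have hDn : 0 < Dn := by
      by_contra hc
      apply hd; rw [hD]
      omega
    rw [loopB_eq_sum (Dn : Int) (n : Int) (by exact_mod_cast hDn) (by exact_mod_cast h0)
        ((Dn : Int) + 1 - 1).toNat 1 0 (by norm_num) rfl]
    simp only [Int.toNat_one, Int.toNat_natCast]
    rw [core_count Dn n hDn]
    have hfe : ((Finset.Icc 1 n).filter (fun k : Nat => (k : Int) ∣ (Dn : Int)))
        = ((Finset.Icc 1 n).filter (fun k : Nat => Dn % k = 0)) := by
      apply Finset.filter_congr
      intro x hx
      simp only [Int.natCast_dvd_natCast]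
      exact ⟨fun h => Nat.dvd_iff_mod_eq_zero.mp h, fun h => Nat.dvd_of_mod_eq_zero h⟩
    rw [hfe]
    ring

-- ===== VERDICT (by name: the statement is the Claim_ definition above) =====
theorem simple_check_spec : Claim_equal_simple_check := by
  intro a b _
  unfold Spec_simple_check
  have hhi : (if a ≥ b then a else b) = max a b := by split_ifs <;> omega
  have hlo : (if a ≥ b then b else a) = min a b := by split_ifs <;> omega
  rw [simple_check, simple_check_alt]
  simp only [hhi, hlo]
  by_cases h0 : min a b ≤ 0
  · rw [if_pos h0, simpleLoopA, dif_neg (by omega)]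
  · rw [if_neg h0, AeqB (max a b) (min a b) (by omega) min_le_max]
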